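-- pv_equiv track=rewrite | github.com/kyong/misskey-maintenance | rename_emojis_category.py | organize_emojis_by_category
-- ===== SOURCE A (Python) =====
-- def organize_emojis_by_category(emojis):
--     organized_emojis = {}
--     for emoji in emojis:
--         category = emoji['category']
--         if category not in organized_emojis:
--             organized_emojis[category] = []
--         organized_emojis[category].append(emoji)
--     return organized_emojis
-- ===== SOURCE B (Python) =====
-- def organize_emojis_by_category(emojis):
--     categories = list(dict.fromkeys(emoji['category'] for emoji in emojis))
--     return {category: [emoji for emoji in emojis if emoji['category'] == category]
--             for category in categories}
-- ===== Notes on version B (the rewrite author's own statement) =====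
-- stated objective: alternative
-- what changed: Replaces A's single accumulating pass over a mutable dict with a two-step grouping: first the ordered list of distinct categories via dict.fromkeys, then one comprehension collecting each category's emojis by filtering the input list.
import Mathlib
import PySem

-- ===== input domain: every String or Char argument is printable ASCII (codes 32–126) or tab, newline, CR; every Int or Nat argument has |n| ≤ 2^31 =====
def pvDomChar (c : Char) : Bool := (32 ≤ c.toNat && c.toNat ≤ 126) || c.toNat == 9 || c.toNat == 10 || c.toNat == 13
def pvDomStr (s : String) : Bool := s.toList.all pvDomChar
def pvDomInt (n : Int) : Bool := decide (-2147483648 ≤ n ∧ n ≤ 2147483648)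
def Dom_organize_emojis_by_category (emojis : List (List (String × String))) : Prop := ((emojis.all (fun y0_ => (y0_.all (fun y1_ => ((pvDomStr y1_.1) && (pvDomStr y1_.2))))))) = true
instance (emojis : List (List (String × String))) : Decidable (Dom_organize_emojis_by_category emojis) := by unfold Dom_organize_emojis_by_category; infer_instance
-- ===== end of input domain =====

-- B changes the decomposition (distinct-category list, then one filter per category) — 'alternative', not faster.

-- shared helper: emoji['category'] — first-match lookup in the emoji's association list
-- (total stand-in; Pre_ below guarantees the key is present, where Python does not raise)
def pvCat (e : List (String × String)) : String :=
  ((PySem.Dict.mk e).get? "category").getD ""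

-- ===== PORT A =====
def organize_emojis_by_category (emojis : List (List (String × String))) : List (String × List (List (String × String))) :=
  (emojis.foldl (fun d e =>
      let category := pvCat e
      let d' := if d.contains category then d else d.insert category []
      d'.insert category (d'.getD category [] ++ [e]))
    PySem.Dict.empty).items

-- ===== PORT B =====
def organize_emojis_by_category_alt (emojis : List (List (String × String))) : List (String × List (List (String × String))) :=
  let categories := PySem.List.dedup (emojis.map pvCat)
  categories.map (fun category => (category, emojis.filter (fun e => pvCat e == category)))

-- ===== PRECONDITION & SPEC =====
-- Pre_ excludes exactly the inputs on which Python A raises KeyError: an emoji without a 'category' key.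
def Pre_organize_emojis_by_category (emojis : List (List (String × String))) : Prop :=
  (emojis.all (fun e => (PySem.Dict.mk e).contains "category")) = true
instance (emojis : List (List (String × String))) : Decidable (Pre_organize_emojis_by_category emojis) := by unfold Pre_organize_emojis_by_category; infer_instance

def pvWitness_organize_emojis_by_category : (List (List (String × String))) :=
  [[("category", "faces"), ("name", "smile")], [("category", "food"), ("name", "pizza")], [("category", "faces"), ("name", "wink")]]

def Spec_organize_emojis_by_category (emojis : List (List (String × String))) (out : List (String × List (List (String × String)))) : Prop := out = organize_emojis_by_category_alt emojis
instance (emojis : List (List (String × String))) (out : List (String × List (List (String × String)))) : Decidable (Spec_organize_emojis_by_category emojis out) := by unfold Spec_organize_emojis_by_category; infer_instance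

-- ===== CLAIM (what is proved, stated in full; the proofs are below) =====
def Claim_equal_organize_emojis_by_category : Prop := ∀ (emojis : List (List (String × String))), Dom_organize_emojis_by_category emojis → Pre_organize_emojis_by_category emojis → Spec_organize_emojis_by_category emojis (organize_emojis_by_category emojis)

-- ===== LEMMAS AND PROOFS =====

-- A's loop body ("ensure the key, then append") is exactly a Dict.modify step
theorem pvStep_eq_modify (d : PySem.Dict String (List (List (String × String)))) (e : List (String × String)) :
    (let category := pvCat e
     let d' := if d.contains category then d else d.insert category []
     d'.insert category (d'.getD category [] ++ [e]))
    = d.modify (pvCat e) [] (· ++ [e]) := by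
  by_cases h : d.contains (pvCat e) = true
  · simp only [h, if_pos]
    apply PySem.Dict.ext
    simp only [PySem.Dict.modify, PySem.Dict.getD_eq_get?_getD]
  · have h' : d.contains (pvCat e) = false := by simpa using h
    have hg : d.get? (pvCat e) = none := by
      rw [PySem.Dict.get?_eq_none_iff_contains]; exact h'
    simp only [h, if_neg, Bool.not_eq_true]
    rw [PySem.Dict.getD_insert_self, PySem.Dict.insert_insert_self]
    apply PySem.Dict.ext
    simp only [PySem.Dict.modify, PySem.Dict.getD_eq_get?_getD, hg, Option.getD_none, List.nil_append]

-- ===== VERDICT (by name: the statement is the Claim_ definition above) =====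
theorem organize_emojis_by_category_spec : Claim_equal_organize_emojis_by_category := by
  intro emojis _ _
  unfold Spec_organize_emojis_by_category organize_emojis_by_category organize_emojis_by_category_alt
  -- rewrite A's fold step to a modify step
  have hstep : (emojis.foldl (fun d e =>
      let category := pvCat e
      let d' := if d.contains category then d else d.insert category []
      d'.insert category (d'.getD category [] ++ [e]))
    PySem.Dict.empty)
    = emojis.foldl (fun d e => d.modify (pvCat e) [] (· ++ [e])) PySem.Dict.empty := by
    apply PySem.List.foldl_congr_mem
    intro d e _
    exact pvStep_eq_modify d e
  rw [hstep]
  -- view the fold as a fold over (category, emoji) pairs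
  have hmap : emojis.foldl (fun d e => d.modify (pvCat e) [] (· ++ [e])) PySem.Dict.empty
      = (emojis.map (fun e => (pvCat e, e))).foldl (fun d p => d.modify p.1 [] (· ++ [p.2])) PySem.Dict.empty := by
    rw [List.foldl_map]
  rw [hmap]
  set l := emojis.map (fun e => (pvCat e, e)) with hl
  have hnd : ((l.foldl (fun d p => d.modify p.1 [] (· ++ [p.2])) PySem.Dict.empty)).keys.Nodup := by
    exact PySem.Dict.nodup_keys_foldl_modify_key l Prod.fst [] (fun _ p => (· ++ [p.2])) PySem.Dict.empty (by simp)
  rw [PySem.Dict.items_eq_map_keys _ hnd []]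
  have hkeys : ((l.foldl (fun d p => d.modify p.1 [] (· ++ [p.2])) PySem.Dict.empty)).keys
      = PySem.Set.ofList (emojis.map pvCat) := by
    rw [PySem.Dict.keys_foldl_modify_key l Prod.fst [] (fun _ p => (· ++ [p.2]))]
    simp [hl, List.map_map, PySem.Set.update, PySem.Set.ofList_eq_foldl, Function.comp_def, PySem.Dict.keys_empty]
  rw [hkeys, ← PySem.List.dedup_eq_ofList]
  apply List.map_congr_left
  intro c _
  have hget : ((l.foldl (fun d p => d.modify p.1 [] (· ++ [p.2])) PySem.Dict.empty)).getD c []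
      = (l.filter (fun p => p.1 == c)).map (·.2) := by
    rw [PySem.Dict.getD_foldl_modify_append]
    simp [PySem.Dict.getD_empty]
  rw [hget, hl]
  simp [List.filter_map, List.map_map, Function.comp_def]
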